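-- pv_equiv track=rewrite | github.com/pratik1133/tikona-research-os-2 | scripts/colab_ppt_generator.py | remove_dup_declarations
-- ===== SOURCE A (Python) =====
-- def remove_dup_declarations(code):
--     lines, result = code.split("\n"), []
--     seen_setup = skip_fn = False
--     fn_depth = removed = 0
--     for ln in lines:
--         s = ln.strip()
--         if "pres.layout" in s:
--             seen_setup = True
--         if skip_fn:
--             fn_depth += s.count("{") - s.count("}")
--             if fn_depth <= 0:
--                 skip_fn = False
--                 fn_depth = 0
--             removed += 1
--             continue
--         if seen_setup:
--             if s.startswith("const pptxgen = require"):
--                 removed += 1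
--                 continue
--             if s.startswith("let pres = new pptxgen") or s.startswith("var pres = new pptxgen"):
--                 removed += 1
--                 continue
--             if s == 'const TOTAL = 16;' or s == 'const TOTAL = 18;':
--                 removed += 1
--                 continue
--             if s.startswith("const C = {"):
--                 removed += 1
--                 continue
--             if s.startswith("const mkS"):
--                 removed += 1
--                 continue
--             if s.startswith("function H(") or s.startswith("function F("):
--                 skip_fn = True
--                 fn_depth = 0
--                 removed += 1
--                 continue
--         result.append(ln)
--     return "\n".join(result), removed
-- ===== SOURCE B (Python) =====
-- def remove_dup_declarations(code):
--     lines = code.split("\n")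
--     n = len(lines)
--     out = []
--     removed = 0
--     seen_setup = False
--     i = 0
--     while i < n:
--         s = lines[i].strip()
--         if "pres.layout" in s:
--             seen_setup = True
--         if seen_setup and (s.startswith("const pptxgen = require")
--                            or s.startswith("let pres = new pptxgen")
--                            or s.startswith("var pres = new pptxgen")
--                            or s == 'const TOTAL = 16;'
--                            or s == 'const TOTAL = 18;'
--                            or s.startswith("const C = {")
--                            or s.startswith("const mkS")):
--             removed += 1
--             i += 1
--         elif seen_setup and (s.startswith("function H(") or s.startswith("function F(")):
--             removed += 1
--             i += 1
--             depth = 0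
--             while i < n:
--                 t = lines[i].strip()
--                 depth += t.count("{") - t.count("}")
--                 removed += 1
--                 i += 1
--                 if depth <= 0:
--                     break
--         else:
--             out.append(lines[i])
--             i += 1
--     return "\n".join(out), removed
-- ===== Notes on version B (the rewrite author's own statement) =====
-- stated objective: alternative
-- what changed: Replaced the single for-loop with skip_fn/fn_depth latch state by an index-based while loop with merged prefix conditions and a separate inner brace-counting loop that consumes a swallowed function body; no cross-iteration skip state remains.
import Mathlib
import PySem

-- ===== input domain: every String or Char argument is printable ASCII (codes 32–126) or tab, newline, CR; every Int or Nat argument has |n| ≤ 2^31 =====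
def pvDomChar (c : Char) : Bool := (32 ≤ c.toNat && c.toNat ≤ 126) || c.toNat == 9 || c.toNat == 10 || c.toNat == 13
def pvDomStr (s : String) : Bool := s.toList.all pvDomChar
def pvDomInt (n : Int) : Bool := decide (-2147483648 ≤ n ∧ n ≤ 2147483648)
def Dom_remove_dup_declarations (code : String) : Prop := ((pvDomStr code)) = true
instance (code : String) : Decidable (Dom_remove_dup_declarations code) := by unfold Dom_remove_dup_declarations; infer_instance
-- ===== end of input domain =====

-- B replaces A's for-loop with skip_fn/fn_depth latch state by an index-based while loop with merged
-- prefix conditions and an inner brace-counting loop for swallowed function bodies (objective: alternative).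


-- ===== PORT A =====
-- A's for-loop over lines with state (result, seen_setup, skip_fn, fn_depth, removed),
-- transcribed as structural recursion over the same state; branches in A's order.
def pvALoop : List String → List String → Bool → Bool → Int → Int → List String × Int
  | [], result, _, _, _, removed => (result, removed)
  | ln :: rest, result, seen0, skipFn, fnDepth, removed =>
    let s := PySem.Str.strip ln
    let seen := if PySem.Str.isIn "pres.layout" s then true else seen0
    if skipFn then
      let d := fnDepth + (PySem.Str.count s "{" : Int) - (PySem.Str.count s "}" : Int)
      if d ≤ 0 then pvALoop rest result seen false 0 (removed + 1)
      else pvALoop rest result seen true d (removed + 1)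
    else if seen && PySem.Str.startswith s "const pptxgen = require" then
      pvALoop rest result seen skipFn fnDepth (removed + 1)
    else if seen && (PySem.Str.startswith s "let pres = new pptxgen" || PySem.Str.startswith s "var pres = new pptxgen") then
      pvALoop rest result seen skipFn fnDepth (removed + 1)
    else if seen && (s == "const TOTAL = 16;" || s == "const TOTAL = 18;") then
      pvALoop rest result seen skipFn fnDepth (removed + 1)
    else if seen && PySem.Str.startswith s "const C = {" then
      pvALoop rest result seen skipFn fnDepth (removed + 1)
    else if seen && PySem.Str.startswith s "const mkS" then
      pvALoop rest result seen skipFn fnDepth (removed + 1)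
    else if seen && (PySem.Str.startswith s "function H(" || PySem.Str.startswith s "function F(") then
      pvALoop rest result seen true 0 (removed + 1)
    else
      pvALoop rest (result ++ [ln]) seen skipFn fnDepth removed

def remove_dup_declarations (code : String) : String × Int :=
  let lines := (PySem.Str.split? code "\n").getD []
  let p := pvALoop lines [] false false 0 0
  (PySem.Str.join "\n" p.1, p.2)

-- ===== PORT B =====
-- merged duplicate-declaration test
def pvDupB (s : String) : Bool :=
  PySem.Str.startswith s "const pptxgen = require"
  || PySem.Str.startswith s "let pres = new pptxgen"
  || PySem.Str.startswith s "var pres = new pptxgen"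
  || s == "const TOTAL = 16;"
  || s == "const TOTAL = 18;"
  || PySem.Str.startswith s "const C = {"
  || PySem.Str.startswith s "const mkS"

def pvFnB (s : String) : Bool :=
  PySem.Str.startswith s "function H(" || PySem.Str.startswith s "function F("

-- B's inner while loop: consume lines counting braces until depth ≤ 0; returns (remaining lines, removed)
def pvSkipB : List String → Int → Int → List String × Int
  | [], _, removed => ([], removed)
  | t :: rest, depth, removed =>
    let u := PySem.Str.strip t
    let d := depth + (PySem.Str.count u "{" : Int) - (PySem.Str.count u "}" : Int)
    if d ≤ 0 then (rest, removed + 1)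
    else pvSkipB rest d (removed + 1)

-- needed for termination of pvBLoop
theorem pvSkipB_length_le (l : List String) (d r : Int) :
    (pvSkipB l d r).1.length ≤ l.length := by
  induction l generalizing d r with
  | nil => simp [pvSkipB]
  | cons t rest ih =>
    simp only [pvSkipB]
    split
    · simp
    · exact Nat.le_succ_of_le (ih _ _)

-- B's outer while loop over the line index, as recursion on the remaining lines
def pvBLoop (lines : List String) (seen0 : Bool) (removed : Int) : List String × Int :=
  match lines with
  | [] => ([], removed)
  | ln :: rest =>
    let s := PySem.Str.strip ln
    let seen := if PySem.Str.isIn "pres.layout" s then true else seen0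
    if seen && pvDupB s then pvBLoop rest seen (removed + 1)
    else if seen && pvFnB s then
      let p := pvSkipB rest 0 (removed + 1)
      pvBLoop p.1 seen p.2
    else
      let p := pvBLoop rest seen removed
      (ln :: p.1, p.2)
termination_by lines.length
decreasing_by
  · simp
  · exact Nat.lt_succ_of_le (pvSkipB_length_le rest 0 (removed + 1))
  · simp

def remove_dup_declarations_alt (code : String) : String × Int :=
  let lines := (PySem.Str.split? code "\n").getD []
  let p := pvBLoop lines false 0
  (PySem.Str.join "\n" p.1, p.2)

-- ===== PRECONDITION & SPEC =====
def Spec_remove_dup_declarations (code : String) (out : String × Int) : Prop := out = remove_dup_declarations_alt code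
instance (code : String) (out : String × Int) : Decidable (Spec_remove_dup_declarations code out) := by unfold Spec_remove_dup_declarations; infer_instance

-- ===== CLAIM (what is proved, stated in full; the proofs are below) =====
def Claim_equal_remove_dup_declarations : Prop := ∀ (code : String), Dom_remove_dup_declarations code → Spec_remove_dup_declarations code (remove_dup_declarations code)

-- ===== LEMMAS AND PROOFS =====

-- A in skip mode (seen = true) consumes exactly the lines pvSkipB consumes.
theorem pvALoop_skip (l : List String) (res : List String) (d r : Int) :
    pvALoop l res true true d r
      = pvALoop (pvSkipB l d r).1 res true false 0 (pvSkipB l d r).2 := by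
  induction l generalizing d r with
  | nil => simp [pvALoop, pvSkipB]
  | cons t rest ih =>
    have hseen : (if PySem.Str.isIn "pres.layout" (PySem.Str.strip t) = true then true else true) = true := by
      split <;> rfl
    simp only [pvALoop, pvSkipB, hseen]
    by_cases hd : d + (PySem.Str.count (PySem.Str.strip t) "{" : Int) - (PySem.Str.count (PySem.Str.strip t) "}" : Int) ≤ 0
    · simp only [if_pos hd, if_true]
    · simp only [if_neg hd, if_true]
      exact ih _ _

-- A with skip_fn = false equals B with the same seen flag, up to the result accumulator.
theorem pvALoop_eq_pvBLoop (n : Nat) (l : List String) (res : List String) (seen : Bool) (r : Int)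
    (hn : l.length ≤ n) :
    pvALoop l res seen false 0 r
      = (res ++ (pvBLoop l seen r).1, (pvBLoop l seen r).2) := by
  induction n generalizing l res seen r with
  | zero =>
    have : l = [] := List.length_eq_zero_iff.mp (Nat.le_zero.mp hn)
    subst this
    simp [pvALoop, pvBLoop]
  | succ n ih =>
    match l with
    | [] => simp [pvALoop, pvBLoop]
    | ln :: rest =>
      have hrest : rest.length ≤ n := by
        have := hn; simp only [List.length_cons] at this; omega
      simp only [pvALoop, pvBLoop]
      generalize (if PySem.Str.isIn "pres.layout" (PySem.Str.strip ln) = true then true else seen) = sn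
      have ihStep := ih rest res sn (r + 1) hrest
      have ihApp := ih rest (res ++ [ln]) sn r hrest
      have ihSkip := ih (pvSkipB rest 0 (r + 1)).1 res true (pvSkipB rest 0 (r + 1)).2
        (le_trans (pvSkipB_length_le rest 0 (r + 1)) hrest)
      rw [if_neg (show ¬(false = true) by simp)]
      by_cases hsn : sn = true
      · subst hsn
        simp only [pvDupB, pvFnB, Bool.true_and, Bool.or_eq_true, beq_iff_eq]
        by_cases hA1 : PySem.Str.startswith (PySem.Str.strip ln) "const pptxgen = require" = true
        · rw [if_pos hA1, if_pos (Or.inl (Or.inl (Or.inl (Or.inl (Or.inl (Or.inl hA1)))))), ihStep]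
        by_cases hA2 : PySem.Str.startswith (PySem.Str.strip ln) "let pres = new pptxgen" = true
                        ∨ PySem.Str.startswith (PySem.Str.strip ln) "var pres = new pptxgen" = true
        · rw [if_neg hA1, if_pos hA2, if_pos (hA2.elim (fun h => Or.inl (Or.inl (Or.inl (Or.inl (Or.inl (Or.inr h)))))) (fun h => Or.inl (Or.inl (Or.inl (Or.inl (Or.inr h)))))), ihStep]
        by_cases hA3 : PySem.Str.strip ln = "const TOTAL = 16;" ∨ PySem.Str.strip ln = "const TOTAL = 18;"
        · rw [if_neg hA1, if_neg hA2, if_pos hA3, if_pos (hA3.elim (fun h => Or.inl (Or.inl (Or.inl (Or.inr h)))) (fun h => Or.inl (Or.inl (Or.inr h)))), ihStep]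
        by_cases hA4 : PySem.Str.startswith (PySem.Str.strip ln) "const C = {" = true
        · rw [if_neg hA1, if_neg hA2, if_neg hA3, if_pos hA4, if_pos (Or.inl (Or.inr hA4)), ihStep]
        by_cases hA5 : PySem.Str.startswith (PySem.Str.strip ln) "const mkS" = true
        · rw [if_neg hA1, if_neg hA2, if_neg hA3, if_neg hA4, if_pos hA5, if_pos (Or.inr hA5), ihStep]
        by_cases hA6 : PySem.Str.startswith (PySem.Str.strip ln) "function H(" = true
                        ∨ PySem.Str.startswith (PySem.Str.strip ln) "function F(" = true
        · obtain ⟨h2a, h2b⟩ := not_or.mp hA2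
          obtain ⟨h3a, h3b⟩ := not_or.mp hA3
          rw [if_neg hA1, if_neg hA2, if_neg hA3, if_neg hA4, if_neg hA5, if_pos hA6,
              if_neg (not_or.mpr ⟨not_or.mpr ⟨not_or.mpr ⟨not_or.mpr ⟨not_or.mpr ⟨not_or.mpr ⟨hA1, h2a⟩, h2b⟩, h3a⟩, h3b⟩, hA4⟩, hA5⟩),
              if_pos hA6, pvALoop_skip]
          exact ihSkip
        · obtain ⟨h2a, h2b⟩ := not_or.mp hA2
          obtain ⟨h3a, h3b⟩ := not_or.mp hA3
          obtain ⟨h6a, h6b⟩ := not_or.mp hA6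
          rw [if_neg hA1, if_neg hA2, if_neg hA3, if_neg hA4, if_neg hA5, if_neg hA6,
              if_neg (not_or.mpr ⟨not_or.mpr ⟨not_or.mpr ⟨not_or.mpr ⟨not_or.mpr ⟨not_or.mpr ⟨hA1, h2a⟩, h2b⟩, h3a⟩, h3b⟩, hA4⟩, hA5⟩),
              if_neg hA6, ihApp]
          simp
      · have hsn0 : sn = false := by simpa using hsn
        subst hsn0
        simp only [Bool.false_and, Bool.false_eq_true, if_false, ihApp]
        simp

-- ===== VERDICT (by name: the statement is the Claim_ definition above) =====
theorem remove_dup_declarations_spec : Claim_equal_remove_dup_declarations := by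
  intro code _
  unfold Spec_remove_dup_declarations remove_dup_declarations remove_dup_declarations_alt
  have h := pvALoop_eq_pvBLoop ((PySem.Str.split? code "\n").getD []).length
    ((PySem.Str.split? code "\n").getD []) [] false 0 le_rfl
  simp only [h, List.nil_append]
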